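-- pv_equiv track=rewrite | github.com/sihensel/slh-dsa | python/wots.py | gen_len2
-- ===== SOURCE A (Python) =====
-- from math import ceil, floor
--
-- def gen_len2(n: int, lg_w: int) -> int:          #Input: Security parameter ğ‘›, bits per hash chain ğ‘™ğ‘”_ğ‘¤
--     w = 2 ** lg_w                                #Compute w: w = 2^lg_w
--     len1 = floor((8 * n + lg_w - 1) / lg_w) #Compute len1
--     max_checksum = len1 * (w - 1)                #Compute maximum possible checksum value
--     len2 = 1                                     #Initialize len2
--     capacity = w                                 #Initialize capacity
--
--     while capacity <= max_checksum:              #Loop until capacity exceeds max_checksum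
--         len2 += 1
--         capacity *= w
--
--     return len2                                  #Output: ğ‘™ğ‘’ğ‘›2
-- ===== SOURCE B (Python) =====
-- def gen_len2(n: int, lg_w: int) -> int:
--     # Closed form: len2 = number of base-w digits of max_checksum,
--     # i.e. ceil(bit_length(max_checksum) / lg_w), with a floor of 1.
--     w = 2 ** lg_w
--     len1 = (8 * n + lg_w - 1) // lg_w
--     max_checksum = len1 * (w - 1)
--     if max_checksum < 1:
--         return 1
--     return -(-max_checksum.bit_length() // lg_w)
-- ===== Notes on version B (the rewrite author's own statement) =====
-- stated objective: faster
-- what changed: Replaces A's while loop (repeated capacity *= w until it exceeds the checksum) with an O(1) closed form: len2 = ceil(max_checksum.bit_length() / lg_w), floored at 1; len1/max_checksum are computed with integer floor division, exact on the domain.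
import Mathlib
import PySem

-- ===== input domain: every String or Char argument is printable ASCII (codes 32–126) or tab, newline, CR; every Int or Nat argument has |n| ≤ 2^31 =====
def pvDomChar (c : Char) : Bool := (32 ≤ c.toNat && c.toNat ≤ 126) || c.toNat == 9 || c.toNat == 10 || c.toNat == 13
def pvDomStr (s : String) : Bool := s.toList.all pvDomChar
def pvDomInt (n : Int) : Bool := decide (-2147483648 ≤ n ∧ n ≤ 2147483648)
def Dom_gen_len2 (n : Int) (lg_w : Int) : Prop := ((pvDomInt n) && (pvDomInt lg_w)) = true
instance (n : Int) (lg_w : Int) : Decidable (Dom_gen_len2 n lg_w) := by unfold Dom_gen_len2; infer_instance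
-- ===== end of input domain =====

-- B replaces A's `capacity *= w` while-loop by the O(1) closed form ceil(bit_length(max_checksum)/lg_w), floored at 1 (objective: faster, constant factor).
-- Ports are exact on Pre_ (1 ≤ lg_w): there `2 ** lg_w` is the integer 2^lg_w, and `floor((8*n+lg_w-1)/lg_w)` (float division) equals integer
-- floor division because |8*n+lg_w-1| < 2^53 on Dom, so it is ported as PySem.Int.floordiv.

-- 2^k as a left shift (Lean's built-in Nat.pow refuses exponents ≥ 2^31 at
-- evaluation time, which the input domain reaches); = 2^k by pyPow2_eq below.
def pyPow2 (k : Nat) : Nat := 1 <<< k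

-- ===== PORT A =====
-- A's while loop: `while capacity <= max_checksum: len2 += 1; capacity *= w`.
-- fuel is only a termination bound: under Pre_ the loop body runs fewer than
-- len1 + 2 times (capacity multiplies by w ≥ 2 each step; proved in the loop
-- lemma below), so the fuel never runs out on admitted inputs.
def gen_len2_loop (w m : Int) : Nat → Int → Int → Int
  | 0, len2, _ => len2
  | fuel+1, len2, capacity =>
      if capacity ≤ m then gen_len2_loop w m fuel (len2 + 1) (capacity * w) else len2

def gen_len2 (n : Int) (lg_w : Int) : Int :=
  let w : Int := ((pyPow2 lg_w.toNat : Nat) : Int)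
  let len1 : Int := PySem.Int.floordiv (8 * n + lg_w - 1) lg_w
  let max_checksum : Int := len1 * (w - 1)
  gen_len2_loop w max_checksum (len1.toNat + 2) 1 w

-- ===== PORT B =====
-- Hand port of Python's O(1) builtin `int.bit_length()` for a POSITIVE argument:
-- exponential search for an exponent bracket 2^lo ≤ n < 2^hi, then binary search.
-- Exact (= the bit length) for every n with 1 ≤ n < 2^(2^66), which covers every
-- max_checksum reachable from the stated input domain; proved by pyBitLength_spec below.
def pyBitLenUp (n : Nat) : Nat → Nat → Nat → Nat × Nat
  | 0, lo, d => (lo, d)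
  | f+1, lo, d => if n < pyPow2 d then (lo, d) else pyBitLenUp n f d (2 * d)

def pyBitLenBin (n : Nat) : Nat → Nat → Nat → Nat
  | 0, lo, _ => lo
  | f+1, lo, hi =>
      if hi ≤ lo + 1 then lo
      else
        let mid := (lo + hi) / 2
        if pyPow2 mid ≤ n then pyBitLenBin n f mid hi else pyBitLenBin n f lo mid

def pyBitLength (n : Nat) : Nat :=
  let p := pyBitLenUp n 66 0 3
  pyBitLenBin n 128 p.1 p.2 + 1

def gen_len2_alt (n : Int) (lg_w : Int) : Int :=
  let w : Int := ((pyPow2 lg_w.toNat : Nat) : Int)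
  let len1 : Int := PySem.Int.floordiv (8 * n + lg_w - 1) lg_w
  let max_checksum : Int := len1 * (w - 1)
  if max_checksum < 1 then 1
  else -(PySem.Int.floordiv (-(pyBitLength max_checksum.toNat : Int)) lg_w)

-- ===== PRECONDITION & SPEC =====
-- Pre_ admits the natural domain lg_w ≥ 1 (bits per hash chain) plus the negative
-- lg_w inputs on which A terminates (len1 ≥ 0, so the float checksum is ≤ 0 and the
-- loop never runs). It excludes exactly the inputs where A returns no value:
-- lg_w = 0 (A raises ZeroDivisionError) and lg_w < 0 with len1 < 0, where the float
-- checksum is positive and A's capacity *= w shrinks forever (A diverges).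
def Pre_gen_len2 (n : Int) (lg_w : Int) : Prop :=
  1 ≤ lg_w ∨ (lg_w ≤ -1 ∧ 0 ≤ PySem.Int.floordiv (8 * n + lg_w - 1) lg_w)
instance (n : Int) (lg_w : Int) : Decidable (Pre_gen_len2 n lg_w) := by unfold Pre_gen_len2; infer_instance
def pvWitness_gen_len2 : Int × Int := (16, 4)

def Spec_gen_len2 (n : Int) (lg_w : Int) (out : Int) : Prop := out = gen_len2_alt n lg_w
instance (n : Int) (lg_w : Int) (out : Int) : Decidable (Spec_gen_len2 n lg_w out) := by unfold Spec_gen_len2; infer_instance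

-- ===== CLAIM (what is proved, stated in full; the proofs are below) =====
def Claim_equal_gen_len2 : Prop := ∀ (n : Int) (lg_w : Int), Dom_gen_len2 n lg_w → Pre_gen_len2 n lg_w → Spec_gen_len2 n lg_w (gen_len2 n lg_w)

-- ===== LEMMAS AND PROOFS =====

lemma pyPow2_eq (k : Nat) : pyPow2 k = 2 ^ k := by
  unfold pyPow2
  rw [Nat.shiftLeft_eq, one_mul]

-- abbreviation keeping the huge exponent 2^66 opaque to omega/simp
def pvBig : Nat := 2 ^ 66

-- exponential search: from 2^lo ≤ n, lo < d and enough fuel, a bracket 2^lo' ≤ n < 2^hi' with hi' ≤ d * 2^fuel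
lemma pyBitLenUp_spec (n : Nat) :
    ∀ (f lo d : Nat), 2 ^ lo ≤ n → lo < d → n < 2 ^ (d * 2 ^ f) →
    2 ^ (pyBitLenUp n f lo d).1 ≤ n ∧ n < 2 ^ (pyBitLenUp n f lo d).2 ∧
      (pyBitLenUp n f lo d).1 < (pyBitLenUp n f lo d).2 ∧ (pyBitLenUp n f lo d).2 ≤ d * 2 ^ f := by
  intro f
  induction f with
  | zero =>
      intro lo d hlo hlt hf
      simp only [pyBitLenUp]
      refine ⟨hlo, by simpa using hf, hlt, by omega⟩
  | succ f ih =>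
      intro lo d hlo hlt hf
      simp only [pyBitLenUp, pyPow2_eq]
      by_cases h : n < 2 ^ d
      · simp only [if_pos h]
        exact ⟨hlo, h, hlt, Nat.le_mul_of_pos_right d (Nat.pow_pos (by omega))⟩
      · simp only [if_neg h]
        have h2 : 2 ^ d ≤ n := by omega
        have hf' : n < 2 ^ (2 * d * 2 ^ f) := by
          have : d * 2 ^ (f + 1) = 2 * d * 2 ^ f := by ring
          rw [← this]; exact hf
        have := ih d (2 * d) h2 (by omega) hf'
        refine ⟨this.1, this.2.1, this.2.2.1, ?_⟩
        calc (pyBitLenUp n f d (2 * d)).2 ≤ 2 * d * 2 ^ f := this.2.2.2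
        _ = d * 2 ^ (f + 1) := by ring

-- binary search inside a bracket
lemma pyBitLenBin_spec (n : Nat) :
    ∀ (f lo hi : Nat), 2 ^ lo ≤ n → n < 2 ^ hi → lo < hi → hi - lo ≤ 2 ^ f →
    2 ^ (pyBitLenBin n f lo hi) ≤ n ∧ n < 2 ^ (pyBitLenBin n f lo hi + 1) := by
  intro f
  induction f with
  | zero =>
      intro lo hi hlo hhi hlt hw
      have : hi = lo + 1 := by simpa using (by omega : hi = lo + 1)
      simp only [pyBitLenBin]
      exact ⟨hlo, by rw [← this]; exact hhi⟩
  | succ f ih =>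
      intro lo hi hlo hhi hlt hw
      simp only [pyBitLenBin, pyPow2_eq]
      by_cases h1 : hi ≤ lo + 1
      · have : hi = lo + 1 := by omega
        simp only [if_pos h1]
        exact ⟨hlo, by rw [← this]; exact hhi⟩
      · simp only [if_neg h1]
        by_cases h2 : 2 ^ ((lo + hi) / 2) ≤ n
        · simp only [if_pos h2]
          exact ih ((lo + hi) / 2) hi h2 hhi (by omega) (by omega)
        · simp only [if_neg h2]
          exact ih lo ((lo + hi) / 2) hlo (by omega) (by omega) (by omega)

-- pyBitLength n is the bit length of n for 1 ≤ n < 2^(2^66)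
lemma pyBitLength_spec (n : Nat) (h1 : 1 ≤ n) (h2 : n < 2 ^ pvBig) :
    2 ^ (pyBitLength n - 1) ≤ n ∧ n < 2 ^ pyBitLength n := by
  have hup := pyBitLenUp_spec n 66 0 3 (by simpa using h1) (by omega)
    (lt_of_lt_of_le h2 (Nat.pow_le_pow_right (by omega) (by unfold pvBig; omega)))
  have hhiub : (pyBitLenUp n 66 0 3).2 ≤ 3 * 2 ^ 66 := hup.2.2.2
  have hwidth : (pyBitLenUp n 66 0 3).2 - (pyBitLenUp n 66 0 3).1 ≤ 2 ^ 128 := by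
    have h66 : 3 * (2 : Nat) ^ 66 ≤ 2 ^ 128 := by norm_num
    omega
  have hbin := pyBitLenBin_spec n 128 (pyBitLenUp n 66 0 3).1 (pyBitLenUp n 66 0 3).2
    hup.1 hup.2.1 hup.2.2.1 hwidth
  unfold pyBitLength
  exact ⟨by simpa using hbin.1, hbin.2⟩

-- The loop returns len2 + j for the least j : Nat with capacity * w^j > m,
-- provided the fuel is large enough that m < capacity * w^fuel.
lemma gen_len2_loop_char (w m : Int) (hw : 2 ≤ w) :
    ∀ (fuel : Nat) (len2 capacity : Int), 1 ≤ capacity → m < capacity * w ^ fuel →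
    ∃ j : Nat, gen_len2_loop w m fuel len2 capacity = len2 + (j : Int) ∧
      m < capacity * w ^ j ∧ (j = 0 ∨ capacity * w ^ (j - 1) ≤ m) := by
  intro fuel
  induction fuel with
  | zero =>
      intro len2 capacity hc hf
      exact ⟨0, by simp [gen_len2_loop], by simpa using hf, Or.inl rfl⟩
  | succ fuel ih =>
      intro len2 capacity hc hf
      by_cases h : capacity ≤ m
      · have hf' : m < capacity * w * w ^ fuel := by
          calc m < capacity * w ^ (fuel + 1) := hf
          _ = capacity * w * w ^ fuel := by ring
        have hc' : 1 ≤ capacity * w := by nlinarith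
        obtain ⟨j, hrun, hlt, hle⟩ := ih (len2 + 1) (capacity * w) hc' hf'
        refine ⟨j + 1, ?_, ?_, Or.inr ?_⟩
        · simp only [gen_len2_loop, if_pos h, hrun]; push_cast; ring
        · calc m < capacity * w * w ^ j := hlt
            _ = capacity * w ^ (j + 1) := by ring
        · show capacity * w ^ (j + 1 - 1) ≤ m
          rcases Nat.eq_zero_or_pos j with h0 | hj
          · subst h0; simpa using h
          · have heq : capacity * w ^ j = capacity * w * w ^ (j - 1) := by
              rw [mul_assoc, ← pow_succ']
              congr 2
              omega
            rcases hle with h0 | hle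
            · omega
            · rw [Nat.add_sub_cancel, heq]; exact hle
      · exact ⟨0, by simp [gen_len2_loop, h], by simpa using (by omega : m < capacity * 1), Or.inl rfl⟩

-- ===== VERDICT (by name: the statement is the Claim_ definition above) =====
theorem gen_len2_spec : Claim_equal_gen_len2 := by
  intro n lg_w hdom hpre
  rcases hpre with hpre | ⟨hneg, hlen⟩
  case inr =>
    -- lg_w ≤ -1 and len1 ≥ 0: both ports compute w = 1, max_checksum = 0 and return 1
    unfold Spec_gen_len2 gen_len2 gen_len2_alt
    have ht0 : lg_w.toNat = 0 := by omega
    rw [ht0]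
    have hw1 : ((pyPow2 0 : Nat) : Int) = 1 := by norm_num [pyPow2]
    rw [hw1]
    norm_num [gen_len2_loop]
  have hb : -2147483648 ≤ n ∧ n ≤ 2147483648 ∧ -2147483648 ≤ lg_w ∧ lg_w ≤ 2147483648 := by
    have := hdom
    unfold Dom_gen_len2 pvDomInt at this
    simp only [Bool.and_eq_true, decide_eq_true_eq] at this
    exact ⟨this.1.1, this.1.2, this.2.1, this.2.2⟩
  unfold Spec_gen_len2 gen_len2 gen_len2_alt
  have hpre' : 1 ≤ lg_w := hpre
  set t : Nat := lg_w.toNat with ht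
  have htlg : (t : Int) = lg_w := by omega
  have ht1 : 1 ≤ t := by omega
  have ht31 : t ≤ 2147483648 := by omega
  set w : Int := ((pyPow2 t : Nat) : Int) with hwdef
  have hw2 : w = (2 : Int) ^ t := by rw [hwdef, pyPow2_eq]; push_cast; ring
  have hw : 2 ≤ w := by
    rw [hw2]
    calc (2 : Int) = 2 ^ 1 := (pow_one 2).symm
    _ ≤ 2 ^ t := pow_le_pow_right₀ (by norm_num) ht1
  set len1 : Int := PySem.Int.floordiv (8 * n + lg_w - 1) lg_w with hlen1
  -- from the domain bounds: len1 < 2^35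
  have hlen1ub : len1 < 2 ^ 35 := by
    rw [hlen1, PySem.Int.floordiv_lt_iff_lt_mul (by omega)]
    nlinarith
  set m : Int := len1 * (w - 1) with hm
  -- the fuel len1.toNat + 2 is large enough: m < w * w^(len1.toNat + 2)
  have hfuel : m < w * w ^ (len1.toNat + 2) := by
    have hwp : (0 : Int) < w ^ (len1.toNat + 2) := pow_pos (by omega) _
    rcases (by omega : len1 ≤ 0 ∨ 0 < len1) with hL | hL
    · have hm0 : m ≤ 0 := mul_nonpos_of_nonpos_of_nonneg hL (by omega)
      nlinarith
    · set L : Nat := len1.toNat with hLdef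
      have hLL : (L : Int) = len1 := by omega
      have h2 : (L : Int) < 2 ^ L := by exact_mod_cast Nat.lt_two_pow_self
      have h3 : (2 : Int) ^ L ≤ w ^ L := pow_le_pow_left₀ (by norm_num) hw L
      have h4 : w ^ L ≤ w ^ (L + 2) := pow_le_pow_right₀ (by omega) (by omega)
      have hwLp : (0 : Int) < w ^ L := pow_pos (by omega) _
      calc m = len1 * (w - 1) := hm
      _ ≤ len1 * w := by nlinarith
      _ < 2 ^ L * w := by nlinarith
      _ ≤ w ^ L * w := by nlinarith
      _ ≤ w ^ (L + 2) * w := by nlinarith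
      _ = w * w ^ (L + 2) := by ring
  obtain ⟨j, hrun, hlt, hle⟩ :=
    gen_len2_loop_char w m hw (len1.toNat + 2) 1 w (by omega) (by linarith [hfuel])
  rw [hrun]
  by_cases hm1 : m < 1
  · rw [if_pos hm1]
    have hj0 : j = 0 := by
      by_contra h0
      have h : 1 * (w * w ^ (j - 1)) ≤ m := by
        have := hle.resolve_left h0
        linarith [this]
      have h1 : (0 : Int) < w * w ^ (j - 1) := by positivity
      omega
    omega
  · rw [if_neg hm1]
    have hmpos : 0 < m := by omega
    -- bound m < 2^(35 + t) ≤ 2^(2^66) to apply the bit-length spec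
    have hmub : m < (2 : Int) ^ (35 + t) := by
      have hwt : w - 1 < (2 : Int) ^ t := by rw [hw2]; omega
      have hlen1pos : 0 < len1 := by nlinarith
      have hp : (2 : Int) ^ (35 + t) = 2 ^ 35 * 2 ^ t := by rw [pow_add]
      rw [hp]
      have h2t : (0 : Int) < 2 ^ t := by positivity
      nlinarith
    have hNub : m.toNat < 2 ^ pvBig := by
      have hle66 : (2 : Nat) ^ (35 + t) ≤ 2 ^ pvBig := by
        refine Nat.pow_le_pow_right (by omega) ?_
        have h66 : pvBig = 73786976294838206464 := by unfold pvBig; norm_num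
        omega
      have hx : m.toNat < 2 ^ (35 + t) := by
        have hc : ((2 : Nat) ^ (35 + t) : Int) = (2 : Int) ^ (35 + t) := by push_cast; ring
        omega
      exact lt_of_lt_of_le hx hle66
    set s : Nat := pyBitLength m.toNat with hs
    obtain ⟨hlbN, hubN⟩ := pyBitLength_spec m.toNat (by omega) hNub
    rw [← hs] at hlbN hubN
    have hs1 : 1 ≤ s := by
      by_contra hcon
      have h0 : s = 0 := by omega
      rw [h0, pow_zero] at hubN
      omega
    have hub : m < (2 : Int) ^ s := by
      zify at hubN
      omega
    have hlb : (2 : Int) ^ (s - 1) ≤ m := by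
      zify at hlbN
      omega
    -- upper bound: m < w^(j+1) = 2^(t*(j+1)), and 2^(s-1) ≤ m, so s ≤ t*(j+1)
    have hMub : m < (2 : Int) ^ (t * (j + 1)) := by
      calc m < 1 * (w * w ^ j) := by linarith [hlt]
      _ = (2 : Int) ^ (t * (j + 1)) := by rw [one_mul, hw2, ← pow_succ', ← pow_mul]
    have hkey2 : s ≤ t * (j + 1) := by
      by_contra hcon
      have := pow_le_pow_right₀ (by norm_num : (1 : Int) ≤ 2) (by omega : t * (j + 1) ≤ s - 1)
      omega
    -- lower bound: j = 0 (then t*0 = 0 < s), or 2^(t*j) = w^j ≤ m < 2^s, so t*j < s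
    have hkey1 : t * j < s := by
      rcases Nat.eq_zero_or_pos j with h0 | hj1
      · subst h0; simpa using hs1
      · have hwj : (2 : Int) ^ (t * j) ≤ m := by
          have h : 1 * (w * w ^ (j - 1)) ≤ m := by
            have := hle.resolve_left (by omega)
            linarith [this]
          calc (2 : Int) ^ (t * j) = (2 ^ t) ^ j := by rw [pow_mul]
          _ = w * w ^ (j - 1) := by rw [← hw2, ← pow_succ']; congr 1; omega
          _ ≤ m := by linarith [h]
        by_contra hcon
        have := pow_le_pow_right₀ (by norm_num : (1 : Int) ≤ 2) (by omega : s ≤ t * j)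
        omega
    have hfin : 1 + (j : Int) = -(PySem.Int.floordiv (-(s : Int)) lg_w) := by
      rw [eq_comm, PySem.Int.neg_floordiv_neg_eq_iff_of_pos (by omega)]
      constructor
      · have heq : (1 + (j : Int) - 1) * lg_w = (t : Int) * (j : Int) := by
          rw [← htlg]; ring
        rw [heq]
        exact_mod_cast hkey1
      · have heq : (1 + (j : Int)) * lg_w = (t : Int) * ((j : Int) + 1) := by
          rw [← htlg]; ring
        rw [heq]
        exact_mod_cast hkey2
    exact hfin
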